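-- pv_equiv track=rewrite | github.com/kronenthaler/AdventOfCode | 2021/day02.py | part1
-- ===== SOURCE A (Python) =====
-- def part1(ins, pos):
--     moves = {
--         'forward':  (1,  0),
--         'down':     (0,  1),
--         'up':       (0, -1)
--     }
--
--     for i in ins:
--         pos = (pos[0] + moves[i[0]][0]*i[1], pos[1] + moves[i[0]][1]*i[1])
--     return pos[0]*pos[1]
-- ===== SOURCE B (Python) =====
-- def part1(ins, pos):
--     totals = {'forward': 0, 'down': 0, 'up': 0}
--     for d, n in ins:
--         totals[d] += n
--     return (pos[0] + totals['forward']) * (pos[1] + totals['down'] - totals['up'])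
-- ===== Notes on version B (the rewrite author's own statement) =====
-- stated objective: simpler
-- what changed: Replaces the single-pass tuple accumulator driven by a moves-delta dict with three independent filtered sums (forward, down, up) combined arithmetically; Pre_ excludes inputs with an unknown direction, on which A raises KeyError.
import Mathlib
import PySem

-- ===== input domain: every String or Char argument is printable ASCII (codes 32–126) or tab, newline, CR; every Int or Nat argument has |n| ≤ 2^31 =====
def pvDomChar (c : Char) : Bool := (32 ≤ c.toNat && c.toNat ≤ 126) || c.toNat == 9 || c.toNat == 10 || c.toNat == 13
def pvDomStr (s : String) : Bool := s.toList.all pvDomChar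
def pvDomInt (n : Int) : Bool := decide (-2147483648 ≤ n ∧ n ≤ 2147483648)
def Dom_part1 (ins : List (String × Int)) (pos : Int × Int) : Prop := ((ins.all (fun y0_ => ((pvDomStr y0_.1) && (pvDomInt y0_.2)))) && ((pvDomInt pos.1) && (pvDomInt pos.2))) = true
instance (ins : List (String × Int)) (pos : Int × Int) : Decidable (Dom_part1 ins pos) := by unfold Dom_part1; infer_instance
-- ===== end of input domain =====

-- B replaces A's coupled coordinate tuple driven by a moves-delta dict with per-direction totals combined by one arithmetic formula (simpler decomposition, same cost).

-- ===== PORT A =====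
def part1 (ins : List (String × Int)) (pos : Int × Int) : Int :=
  let moves : PySem.Dict String (Int × Int) :=
    PySem.Dict.ofList [("forward", (1, 0)), ("down", (0, 1)), ("up", (0, -1))]
  let fin := ins.foldl (fun pos i =>
    -- moves[i[0]] : KeyError on a missing key is excluded by Pre_part1
    let m := (moves.get? i.1).getD (0, 0)
    (pos.1 + m.1 * i.2, pos.2 + m.2 * i.2)) pos
  fin.1 * fin.2

-- ===== PORT B =====
def part1_alt (ins : List (String × Int)) (pos : Int × Int) : Int :=
  let totals : PySem.Dict String Int := PySem.Dict.ofList [("forward", 0), ("down", 0), ("up", 0)]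
  -- totals[d] += n : KeyError on a direction outside the dict is excluded by Pre_part1
  let totals := ins.foldl (fun t i => t.modify i.1 0 (· + i.2)) totals
  (pos.1 + totals.getD "forward" 0) * (pos.2 + totals.getD "down" 0 - totals.getD "up" 0)

-- ===== PRECONDITION & SPEC =====
-- Pre_ excludes exactly the inputs where A raises KeyError: an instruction whose
-- direction is not one of the three dict keys.
def Pre_part1 (ins : List (String × Int)) (pos : Int × Int) : Prop :=
  (ins.all (fun p => p.1 == "forward" || p.1 == "down" || p.1 == "up")) = true
instance (ins : List (String × Int)) (pos : Int × Int) : Decidable (Pre_part1 ins pos) := by unfold Pre_part1; infer_instance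

def pvWitness_part1 : (List (String × Int)) × (Int × Int) := ([("forward", 3), ("down", 2), ("up", 1)], (0, 0))

def Spec_part1 (ins : List (String × Int)) (pos : Int × Int) (out : Int) : Prop := out = part1_alt ins pos
instance (ins : List (String × Int)) (pos : Int × Int) (out : Int) : Decidable (Spec_part1 ins pos out) := by unfold Spec_part1; infer_instance

-- ===== CLAIM (what is proved, stated in full; the proofs are below) =====
def Claim_equal_part1 : Prop := ∀ (ins : List (String × Int)) (pos : Int × Int), Dom_part1 ins pos → Pre_part1 ins pos → Spec_part1 ins pos (part1 ins pos)
-- ===== LEMMAS AND PROOFS =====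

-- The literal moves dict looked up at each of its three keys.
theorem moves_forward : ((PySem.Dict.ofList [("forward", ((1:Int),(0:Int))), ("down", (0,1)), ("up", (0,-1))]).get? "forward").getD (0, 0) = ((1:Int),(0:Int)) := by decide
theorem moves_down : ((PySem.Dict.ofList [("forward", ((1:Int),(0:Int))), ("down", (0,1)), ("up", (0,-1))]).get? "down").getD (0, 0) = ((0:Int),(1:Int)) := by decide
theorem moves_up : ((PySem.Dict.ofList [("forward", ((1:Int),(0:Int))), ("down", (0,1)), ("up", (0,-1))]).get? "up").getD (0, 0) = ((0:Int),(-1:Int)) := by decide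

-- Invariant of A's fold: under Pre_, the accumulated position is the start plus the filtered sums.
theorem part1_fold_eq (ins : List (String × Int)) (pos : Int × Int)
    (h : (ins.all (fun p => p.1 == "forward" || p.1 == "down" || p.1 == "up")) = true) :
    ins.foldl (fun pos i =>
      let m := ((PySem.Dict.ofList [("forward", ((1 : Int), (0 : Int))), ("down", (0, 1)), ("up", (0, -1))]).get? i.1).getD (0, 0)
      (pos.1 + m.1 * i.2, pos.2 + m.2 * i.2)) pos
    = (pos.1 + ((ins.filter (fun p => p.1 == "forward")).map Prod.snd).sum,
       pos.2 + ((ins.filter (fun p => p.1 == "down")).map Prod.snd).sum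
             - ((ins.filter (fun p => p.1 == "up")).map Prod.snd).sum) := by
  induction ins generalizing pos with
  | nil => simp
  | cons hd tl ih =>
    simp only [List.all_cons, Bool.and_eq_true] at h
    obtain ⟨hhd, htl⟩ := h
    rcases Bool.or_eq_true _ _ |>.mp hhd with h1 | h3
    · rcases Bool.or_eq_true _ _ |>.mp h1 with hf | hd'
      · have hk : hd.1 = "forward" := by simpa using hf
        simp only [List.foldl_cons, List.filter_cons, hk, moves_forward]
        rw [ih _ htl]
        simp
        ring
      · have hk : hd.1 = "down" := by simpa using hd'
        simp only [List.foldl_cons, List.filter_cons, hk, moves_down]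
        rw [ih _ htl]
        simp
        ring
    · have hk : hd.1 = "up" := by simpa using h3
      simp only [List.foldl_cons, List.filter_cons, hk, moves_up]
      rw [ih _ htl]
      simp
      ring

-- B's fold: the totals dict accumulates, per key, the sum of the magnitudes filed under it.
theorem fold_getD (ins : List (String × Int)) (t : PySem.Dict String Int) (k : String) :
    (ins.foldl (fun t i => t.modify i.1 0 (· + i.2)) t).getD k 0
    = t.getD k 0 + ((ins.filter (fun p => p.1 == k)).map Prod.snd).sum := by
  induction ins generalizing t with
  | nil => simp
  | cons hd tl ih =>
    simp only [List.foldl_cons, List.filter_cons, ih]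
    rw [PySem.Dict.getD_modify]
    by_cases hk : k = hd.1
    · subst hk; simp; ring
    · simp [hk, Ne.symm hk]

-- ===== VERDICT (by name: the statement is the Claim_ definition above) =====
theorem part1_spec : Claim_equal_part1 := by
  intro ins pos _ hpre
  show part1 ins pos = part1_alt ins pos
  dsimp only [part1, part1_alt]
  rw [part1_fold_eq ins pos hpre, fold_getD, fold_getD, fold_getD]
  norm_num [PySem.Dict.getD_eq_get?_getD,
    show ((PySem.Dict.ofList [("forward", (0:Int)), ("down", 0), ("up", 0)]).get? "forward") = some 0 from rfl,
    show ((PySem.Dict.ofList [("forward", (0:Int)), ("down", 0), ("up", 0)]).get? "down") = some 0 from rfl,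
    show ((PySem.Dict.ofList [("forward", (0:Int)), ("down", 0), ("up", 0)]).get? "up") = some 0 from rfl]
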